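-- pv_equiv track=rewrite | github.com/anik120/Algorithms | picking_entries_from_matrix.py | largest_sum_possible
-- ===== SOURCE A (Python) =====
-- def largest_sum_possible(A, i, j, k):
-- 	if i > len(A) - 1:
-- 		return 0
-- 	if j > len(A[0]) - 1:
-- 		return 0
-- 	if k <= 0:
-- 		return 0
-- 	else:
-- 		return max(A[i][j] + largest_sum_possible(A, i+1, 0, k-1),
-- 					A[i][j] + largest_sum_possible(A, i, j+1, k-1),
-- 					largest_sum_possible(A, i+1, 0, k))
-- ===== SOURCE B (Python) =====
-- def largest_sum_possible(A, i, j, k):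
--     # Bottom-up DP: each visited row contributes a contiguous run of entries
--     # starting at its entry column (j for row i, 0 for later rows); dp[m] is the
--     # best sum obtainable from the rows below using at most m picks.
--     if k <= 0 or i < 0 or j < 0 or i >= len(A) or (A and j >= len(A[0])):
--         return 0
--     first = A[i][j:]
--     rest = A[i + 1:]
--     total = len(first) + sum(len(r) for r in rest)
--     K = min(k, total)
--     dp = [0] * (K + 1)
--     for row in reversed(rest):
--         pref = [0]
--         for x in row:
--             pref.append(pref[-1] + x)
--         new = []
--         for m in range(K + 1):
--             t_max = min(m, len(row))
--             new.append(max(pref[t] + dp[m - t] for t in range(t_max + 1)))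
--         dp = new
--     pref = [0]
--     for x in first:
--         pref.append(pref[-1] + x)
--     return max(pref[t] + dp[K - t] for t in range(min(K, len(first)) + 1))
-- ===== Notes on version B (the rewrite author's own statement) =====
-- stated objective: alternative
-- what changed: Replaced the three-way recursion by a bottom-up dynamic program over rows: per row a prefix-sum table and a budget-indexed dp vector (dp[m] = best sum from the remaining rows with at most m picks), with the pick budget capped at the number of entries.
-- outside the precondition, e.g. on largest_sum_possible([[1], [5]], -1, 0, 1): A returns 5, B returns 0; on largest_sum_possible([[1], [2, 9]], 0, 0, 2): A returns 3, B returns 11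
import Mathlib
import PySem

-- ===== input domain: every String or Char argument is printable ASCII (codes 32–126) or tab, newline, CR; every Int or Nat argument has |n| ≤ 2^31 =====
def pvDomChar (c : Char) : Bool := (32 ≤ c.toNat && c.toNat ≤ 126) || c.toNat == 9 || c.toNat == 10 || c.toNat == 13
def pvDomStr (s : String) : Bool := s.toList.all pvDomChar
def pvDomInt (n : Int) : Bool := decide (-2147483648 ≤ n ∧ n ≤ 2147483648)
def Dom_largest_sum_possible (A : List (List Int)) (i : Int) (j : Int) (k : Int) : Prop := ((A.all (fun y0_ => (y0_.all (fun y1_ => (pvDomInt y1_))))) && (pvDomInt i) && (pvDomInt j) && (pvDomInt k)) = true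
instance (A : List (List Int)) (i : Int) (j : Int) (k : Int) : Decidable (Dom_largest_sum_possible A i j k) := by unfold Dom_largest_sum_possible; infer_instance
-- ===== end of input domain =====

-- B re-implements A's three-way recursion as a bottom-up dynamic program over rows
-- (prefix sums + a budget-indexed dp vector); equal return values are proved on Pre_
-- (nonnegative start indices, rectangular matrix, plus the trivially-zero guard cases).

-- ===== PORT A =====
-- A[0] in Python raises IndexError when A = [] (reachable only with i < 0, outside Pre_);
-- the port uses headD [] there.  A[i][j] is pyGet?∘pyGet? (getD 0 unreachable inside Pre_).
def largest_sum_possible (A : List (List Int)) (i : Int) (j : Int) (k : Int) : Int :=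
  if i > (A.length : Int) - 1 then 0
  else if j > ((A.headD []).length : Int) - 1 then 0
  else if k ≤ 0 then 0
  else
    max (max ((((PySem.List.pyGet? A i).bind (fun r => PySem.List.pyGet? r j)).getD 0) + largest_sum_possible A (i+1) 0 (k-1))
             ((((PySem.List.pyGet? A i).bind (fun r => PySem.List.pyGet? r j)).getD 0) + largest_sum_possible A i (j+1) (k-1)))
        (largest_sum_possible A (i+1) 0 k)
termination_by (((A.length : Int) - i).toNat, k.toNat)
decreasing_by
  · simp only [not_lt] at *; omega
  · simp only [not_lt] at *; omega
  · simp only [not_lt] at *; omega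

-- ===== PORT B =====
-- running prefix sums: pvPref s row = [s, s+row[0], s+row[0]+row[1], …]
def pvPref (s : Int) : List Int → List Int
  | [] => [s]
  | x :: xs => s :: pvPref (s + x) xs

-- Python max() over a nonempty list
def pvMax : List Int → Int
  | [] => 0
  | x :: xs => xs.foldl max x

-- one DP step (the body of Source B's row loop): new[m] = max over t ≤ min(m,|row|) of pref[t] + dp[m-t]
def pvNewRow (row dp : List Int) (K : Nat) : List Int :=
  (List.range (K + 1)).map (fun m =>
    pvMax ((List.range (min m row.length + 1)).map
      (fun t => (pvPref 0 row).getD t 0 + dp.getD (m - t) 0)))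

-- Source B's `for row in reversed(rest)` loop
def pvDP (rest : List (List Int)) (K : Nat) : List Int :=
  rest.reverse.foldl (fun dp row => pvNewRow row dp K) (List.replicate (K + 1) 0)

def largest_sum_possible_alt (A : List (List Int)) (i : Int) (j : Int) (k : Int) : Int :=
  if k ≤ 0 ∨ i < 0 ∨ j < 0 ∨ (A.length : Int) ≤ i ∨ (A ≠ [] ∧ ((A.headD []).length : Int) ≤ j) then 0
  else
    let first := (A.getD i.toNat []).drop j.toNat
    let rest := A.drop (i.toNat + 1)
    let total := first.length + (rest.map List.length).sum
    let K := min k.toNat total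
    let dp := pvDP rest K
    pvMax ((List.range (min K first.length + 1)).map
      (fun t => (pvPref 0 first).getD t 0 + dp.getD (K - t) 0))

-- ===== PRECONDITION & SPEC =====
-- Pre_ admits the natural domain — nonnegative start indices and a rectangular matrix —
-- plus all guard inputs on which A trivially returns 0.  It excludes negative start
-- indices and ragged (non-rectangular) matrices reaching the recursion: malformed inputs
-- on which Python A either raises IndexError or returns an accidental value via Python's
-- negative-index wraparound / bounds-checking every row against row 0's length.
def Pre_largest_sum_possible (A : List (List Int)) (i : Int) (j : Int) (k : Int) : Prop :=
  (0 ≤ i ∧ 0 ≤ j ∧ ∀ r ∈ A, r.length = (A.headD []).length)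
  ∨ (A.length : Int) ≤ i
  ∨ (k ≤ 0 ∧ (A ≠ [] ∨ 0 ≤ i))
  ∨ (A ≠ [] ∧ ((A.headD []).length : Int) ≤ j)
instance (A : List (List Int)) (i : Int) (j : Int) (k : Int) : Decidable (Pre_largest_sum_possible A i j k) := by unfold Pre_largest_sum_possible; infer_instance

def pvWitness_largest_sum_possible : List (List Int) × Int × Int × Int := ([[1, 2], [3, 4]], 0, 0, 2)

def Spec_largest_sum_possible (A : List (List Int)) (i : Int) (j : Int) (k : Int) (out : Int) : Prop := out = largest_sum_possible_alt A i j k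
instance (A : List (List Int)) (i : Int) (j : Int) (k : Int) (out : Int) : Decidable (Spec_largest_sum_possible A i j k out) := by unfold Spec_largest_sum_possible; infer_instance

-- ===== CLAIM (what is proved, stated in full; the proofs are below) =====
def Claim_equal_largest_sum_possible : Prop := ∀ (A : List (List Int)) (i : Int) (j : Int) (k : Int), Dom_largest_sum_possible A i j k → Pre_largest_sum_possible A i j k → Spec_largest_sum_possible A i j k (largest_sum_possible A i j k)

-- ===== LEMMAS AND PROOFS =====

lemma foldl_max_init (l : List Int) : ∀ (a b : Int), l.foldl max (max a b) = max a (l.foldl max b) := by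
  induction l with
  | nil => intro a b; rfl
  | cons x l ih =>
    intro a b
    simp only [List.foldl_cons]
    rw [max_assoc, ih]

lemma foldl_max_eq (l : List Int) (hl : l ≠ []) (a : Int) : l.foldl max a = max a (pvMax l) := by
  cases l with
  | nil => exact absurd rfl hl
  | cons y l' =>
    simp only [List.foldl_cons, pvMax]
    exact foldl_max_init l' a y

lemma add_foldl_max (l : List Int) : ∀ (a b : Int), a + l.foldl max b = (l.map (a + ·)).foldl max (a + b) := by
  induction l with
  | nil => intro a b; rfl
  | cons x l ih =>
    intro a b
    simp only [List.foldl_cons, List.map_cons]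
    rw [max_add_add_left, ← ih]

lemma pvMax_map_add (l : List Int) (hl : l ≠ []) (a : Int) : pvMax (l.map (a + ·)) = a + pvMax l := by
  cases l with
  | nil => exact absurd rfl hl
  | cons y l' => simp only [List.map_cons, pvMax]; rw [add_foldl_max]

lemma le_foldl_max_init (l : List Int) : ∀ (a : Int), a ≤ l.foldl max a := by
  induction l with
  | nil => intro a; exact le_refl a
  | cons x l ih => intro a; exact le_trans (le_max_left a x) (ih _)

lemma le_foldl_max_of_mem (l : List Int) : ∀ (a x : Int), x ∈ l → x ≤ l.foldl max a := by
  induction l with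
  | nil => intro a x hx; simp at hx
  | cons y l ih =>
    intro a x hx
    rcases List.mem_cons.mp hx with h | h
    · subst h; exact le_trans (le_max_right a x) (le_foldl_max_init l _)
    · exact ih _ _ h

lemma le_pvMax_of_mem (l : List Int) (x : Int) (hx : x ∈ l) : x ≤ pvMax l := by
  cases l with
  | nil => simp at hx
  | cons y l' =>
    rcases List.mem_cons.mp hx with h | h
    · subst h; exact le_foldl_max_init l' _
    · exact le_foldl_max_of_mem l' _ _ h

lemma pvMax_range_peel (f : Nat → Int) (m : Nat) :
    pvMax ((List.range (m+2)).map f) = max (f 0) (pvMax ((List.range (m+1)).map (fun t => f (t+1)))) := by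
  rw [show m + 2 = (m+1) + 1 by rfl, List.range_succ_eq_map]
  simp only [List.map_cons, List.map_map, pvMax]
  rw [foldl_max_eq]
  · rfl
  · simp [List.range_succ]

def G : List (List Int) → Nat → Int
  | [], _ => 0
  | r :: rs, n =>
      pvMax ((List.range (min n r.length + 1)).map
        (fun t => ((r.take t).sum + G rs (n - t))))

lemma G_zero (rs : List (List Int)) : G rs 0 = 0 := by
  induction rs with
  | nil => rfl
  | cons r rs ih => simp [G, pvMax, ih]

lemma G_skip_le (cur : List Int) (rs : List (List Int)) (n : Nat) : G rs n ≤ G (cur :: rs) n := by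
  have hmem : ((cur.take 0).sum + G rs (n - 0)) ∈
      (List.range (min n cur.length + 1)).map (fun t => ((cur.take t).sum + G rs (n - t))) :=
    List.mem_map_of_mem (List.mem_range.mpr (by omega))
  have := le_pvMax_of_mem _ _ hmem
  simp only [List.take_zero, List.sum_nil, Nat.sub_zero, zero_add] at this
  simpa [G] using this

lemma G_nonneg (rs : List (List Int)) (n : Nat) : 0 ≤ G rs n := by
  induction rs generalizing n with
  | nil => exact le_refl 0
  | cons r rs ih => exact le_trans (ih n) (G_skip_le r rs n)

lemma G_nil_cons (rs : List (List Int)) (n : Nat) : G ([] :: rs) n = G rs n := by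
  simp [G, pvMax]

lemma Gcons (a : Int) (cur : List Int) (rs : List (List Int)) (n : Nat) :
    G ((a :: cur) :: rs) (n+1) = max (G rs (n+1)) (a + G (cur :: rs) n) := by
  show pvMax ((List.range (min (n+1) (a :: cur).length + 1)).map
        (fun t => (((a :: cur).take t).sum + G rs (n+1 - t)))) = _
  have hmin : min (n+1) (a :: cur).length + 1 = min n cur.length + 2 := by
    simp only [List.length_cons]; omega
  rw [hmin, pvMax_range_peel]
  congr 1
  · simp
  · have : (fun t => (((a :: cur).take (t+1)).sum + G rs (n+1 - (t+1)))) =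
        (fun t => a + (((cur.take t).sum + G rs (n - t)))) := by
      funext t
      simp only [List.take_succ_cons, List.sum_cons, Nat.add_sub_add_right]
      ring
    rw [this]
    have hne : (List.range (min n cur.length + 1)).map (fun t => ((cur.take t).sum + G rs (n - t))) ≠ [] := by
      simp [List.range_succ]
    calc pvMax ((List.range (min n cur.length + 1)).map (fun t => a + (((cur.take t).sum + G rs (n - t)))))
        = pvMax (((List.range (min n cur.length + 1)).map (fun t => ((cur.take t).sum + G rs (n - t)))).map (a + ·)) := by
          rw [List.map_map]; rfl
      _ = a + G (cur :: rs) n := by rw [pvMax_map_add _ hne]; rfl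

lemma G_min_tot (rs : List (List Int)) : ∀ (n : Nat), G rs n = G rs (min n ((rs.map List.length).sum)) := by
  induction rs with
  | nil => intro n; rfl
  | cons r rs ih =>
    intro n
    by_cases hle : n ≤ r.length + (rs.map List.length).sum
    · have : min n (((r :: rs).map List.length).sum) = n := by
        simp only [List.map_cons, List.sum_cons]; omega
      rw [this]
    · rw [not_le] at hle
      have hT : min n (((r :: rs).map List.length).sum) = r.length + (rs.map List.length).sum := by
        simp only [List.map_cons, List.sum_cons]; omega
      rw [hT]
      show pvMax _ = pvMax _
      have hr1 : min n r.length = r.length := by omega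
      have hr2 : min (r.length + (rs.map List.length).sum) r.length = r.length := by omega
      rw [hr1, hr2]
      congr 1
      apply List.map_congr_left
      intro t ht
      have ht' : t ≤ r.length := by
        have := List.mem_range.mp ht; omega
      congr 1
      rw [ih (n - t), ih (r.length + (rs.map List.length).sum - t)]
      congr 1
      omega

lemma pvPref_getD (row : List Int) : ∀ (s : Int) (t : Nat), t ≤ row.length →
    (pvPref s row).getD t 0 = s + (row.take t).sum := by
  induction row with
  | nil =>
    intro s t ht
    have : t = 0 := by simpa using ht
    subst this
    simp [pvPref]
  | cons x xs ih =>
    intro s t ht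
    cases t with
    | zero => simp [pvPref]
    | succ t =>
      simp only [pvPref, List.getD_cons_succ, List.take_succ_cons, List.sum_cons]
      rw [ih (s + x) t (by simpa using ht)]
      ring

lemma range_map_getD (f : Nat → Int) (K m : Nat) (h : m < K + 1) :
    ((List.range (K + 1)).map f).getD m 0 = f m := by
  rw [List.getD_eq_getElem?_getD]
  simp [h]

lemma pvNewRow_getD (row : List Int) (dp : List Int) (rs : List (List Int)) (K m : Nat)
    (hm : m ≤ K) (hdp : ∀ m' ≤ K, dp.getD m' 0 = G rs m') :
    (pvNewRow row dp K).getD m 0 = G (row :: rs) m := by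
  unfold pvNewRow
  rw [range_map_getD _ _ _ (by omega)]
  show pvMax _ = G (row :: rs) m
  have : ((List.range (min m row.length + 1)).map
      (fun t => (pvPref 0 row).getD t 0 + dp.getD (m - t) 0)) =
      ((List.range (min m row.length + 1)).map
      (fun t => ((row.take t).sum + G rs (m - t)))) := by
    apply List.map_congr_left
    intro t ht
    have ht' : t ≤ min m row.length := by have := List.mem_range.mp ht; omega
    rw [pvPref_getD row 0 t (by omega), hdp (m - t) (by omega)]
    ring_nf
  rw [this]
  rfl

lemma pvDP_getD (rest : List (List Int)) (K : Nat) : ∀ m ≤ K, (pvDP rest K).getD m 0 = G rest m := by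
  unfold pvDP
  rw [List.foldl_reverse]
  induction rest with
  | nil =>
    intro m hm
    simp only [List.foldr_nil]
    rw [List.getD_eq_getElem?_getD]
    simp only [List.getElem?_replicate]
    have : m < K + 1 := by omega
    simp [this, G]
  | cons r rest ih =>
    intro m hm
    simp only [List.foldr_cons]
    exact pvNewRow_getD r _ rest K m hm (fun m' hm' => ih m' hm')

def Aspec (A : List (List Int)) (i j k : Int) : Int :=
  match A.drop i.toNat with
  | [] => 0
  | r :: rs => if r.drop j.toNat = [] then 0 else G (r.drop j.toNat :: rs) k.toNat

lemma A_bridge (A : List (List Int)) (hrect : ∀ r ∈ A, r.length = (A.headD []).length)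
    (i j k : Int) : 0 ≤ i → 0 ≤ j → largest_sum_possible A i j k = Aspec A i j k := by
  fun_induction largest_sum_possible A i j k with
  | case1 i j k h =>
    intro h0i h0j
    have hdrop : A.drop i.toNat = [] := by
      rw [List.drop_eq_nil_iff]; omega
    simp [Aspec, hdrop]
  | case2 i j k h1 h2 =>
    intro h0i h0j
    unfold Aspec
    cases hdrop : A.drop i.toNat with
    | nil => rfl
    | cons r rs =>
      have hrA : r ∈ A := List.mem_of_mem_drop (hdrop ▸ List.mem_cons_self ..)
      have hlen : r.length = (A.headD []).length := hrect r hrA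
      have hnil : r.drop j.toNat = [] := by rw [List.drop_eq_nil_iff]; omega
      simp [hnil]
  | case3 i j k h1 h2 h3 =>
    intro h0i h0j
    unfold Aspec
    cases hdrop : A.drop i.toNat with
    | nil => rfl
    | cons r rs =>
      have hk : k.toNat = 0 := by omega
      rw [hk]
      split <;> simp [G_zero]
  | case4 i j k h1 h2 h3 ih1 ih2 ih3 =>
    intro h0i h0j
    have hi : i.toNat < A.length := by omega
    have hdrop : A.drop i.toNat = A[i.toNat] :: A.drop (i.toNat + 1) :=
      List.drop_eq_getElem_cons hi
    have hrA : A[i.toNat] ∈ A := List.getElem_mem hi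
    have hlen : A[i.toNat].length = (A.headD []).length := hrect _ hrA
    have hj : j.toNat < A[i.toNat].length := by omega
    have hcur : A[i.toNat].drop j.toNat = A[i.toNat][j.toNat] :: A[i.toNat].drop (j.toNat + 1) :=
      List.drop_eq_getElem_cons hj
    have ha : ((PySem.List.pyGet? A i).bind (fun r => PySem.List.pyGet? r j)).getD 0
        = A[i.toNat][j.toNat] := by
      rw [PySem.List.pyGet?_eq_some_getElem A h0i (by exact_mod_cast by omega)]
      simp only [Option.bind_some]
      rw [PySem.List.pyGet?_eq_some_getElem (A[i.toNat]) h0j (by exact_mod_cast by omega)]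
      rfl
    have hrs : ∀ (k' : Int), Aspec A (i+1) 0 k' = G (A.drop (i.toNat + 1)) k'.toNat := by
      intro k'
      unfold Aspec
      have h1' : (i+1).toNat = i.toNat + 1 := by omega
      rw [h1']
      cases hdrop2 : A.drop (i.toNat + 1) with
      | nil => rfl
      | cons r2 rs2 =>
        have hr2A : r2 ∈ A := List.mem_of_mem_drop (hdrop2 ▸ List.mem_cons_self ..)
        have hlen2 : r2.length = (A.headD []).length := hrect r2 hr2A
        show (if r2.drop (0:Int).toNat = [] then 0 else G (r2.drop (0:Int).toNat :: rs2) k'.toNat) = G (r2 :: rs2) k'.toNat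
        have hdz : r2.drop (0:Int).toNat = r2 := by simp
        rw [hdz]
        have hlen2' : 0 < r2.length := by rw [hlen2, ← hlen]; omega
        have : r2 ≠ [] := List.ne_nil_of_length_pos hlen2'
        rw [if_neg this]
    have hn : k.toNat = (k-1).toNat + 1 := by omega
    have hih2 : Aspec A i (j+1) (k-1) =
        if A[i.toNat].drop (j.toNat + 1) = [] then 0
        else G (A[i.toNat].drop (j.toNat + 1) :: A.drop (i.toNat + 1)) (k-1).toNat := by
      unfold Aspec
      rw [hdrop]
      show (if A[i.toNat].drop (j+1).toNat = [] then 0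
        else G (A[i.toNat].drop (j+1).toNat :: A.drop (i.toNat + 1)) (k-1).toNat) = _
      rw [show ((j+1).toNat) = j.toNat + 1 from by omega]
    rw [ih1 (by omega) (by omega), ih2 (by omega) (by omega), ih3 (by omega) (by omega),
        ha, hrs, hrs, hih2]
    have hmatch : Aspec A i j k = if A[i.toNat].drop j.toNat = [] then 0
        else G (A[i.toNat].drop j.toNat :: A.drop (i.toNat + 1)) k.toNat := by
      unfold Aspec
      rw [hdrop]
    rw [hmatch, hcur, if_neg (List.cons_ne_nil _ _)]
    rw [hn, Gcons]
    split_ifs with hc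
    · rw [hc, G_nil_cons]
      have := G_nonneg (A.drop (i.toNat + 1)) (k-1).toNat
      omega
    · have := G_skip_le (A[i.toNat].drop (j.toNat + 1)) (A.drop (i.toNat + 1)) (k-1).toNat
      omega

lemma B_eval (first : List Int) (rest : List (List Int)) (kn : Nat) :
    pvMax ((List.range (min (min kn (first.length + (rest.map List.length).sum)) first.length + 1)).map
      (fun t => (pvPref 0 first).getD t 0 +
        (pvDP rest (min kn (first.length + (rest.map List.length).sum))).getD
          (min kn (first.length + (rest.map List.length).sum) - t) 0))
    = G (first :: rest) kn := by
  set K := min kn (first.length + (rest.map List.length).sum) with hK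
  have h1 : ((List.range (min K first.length + 1)).map
      (fun t => (pvPref 0 first).getD t 0 + (pvDP rest K).getD (K - t) 0)) =
      ((List.range (min K first.length + 1)).map
      (fun t => ((first.take t).sum + G rest (K - t)))) := by
    apply List.map_congr_left
    intro t ht
    have ht' : t ≤ min K first.length := by have := List.mem_range.mp ht; omega
    rw [pvPref_getD first 0 t (by omega), pvDP_getD rest K (K - t) (by omega)]
    ring_nf
  rw [h1]
  have htot : ((first :: rest).map List.length).sum = first.length + (rest.map List.length).sum := by
    simp
  rw [show G (first :: rest) kn = G (first :: rest) K from by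
    rw [G_min_tot (first :: rest) kn, hK, htot]]
  rfl

theorem largest_sum_possible_spec : Claim_equal_largest_sum_possible := by
  intro A i j k _ hPre
  unfold Spec_largest_sum_possible
  by_cases hg : k ≤ 0 ∨ i < 0 ∨ j < 0 ∨ (A.length : Int) ≤ i ∨ (A ≠ [] ∧ ((A.headD []).length : Int) ≤ j)
  · -- B's guard fires; A also returns 0 everywhere inside Pre_ here
    have hB : largest_sum_possible_alt A i j k = 0 := by
      unfold largest_sum_possible_alt
      rw [if_pos hg]
    rw [hB]
    unfold largest_sum_possible
    split_ifs with g1 g2 g3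
    · rfl
    · rfl
    · rfl
    · exfalso
      rcases hg with hk | hi0 | hj0 | hli | ⟨hA, hcols⟩
      · omega
      · rcases hPre with ⟨h, _, _⟩ | h | ⟨h, _⟩ | ⟨_, h⟩ <;> omega
      · rcases hPre with ⟨_, h, _⟩ | h | ⟨h, _⟩ | ⟨_, h⟩ <;> omega
      · omega
      · omega
  · simp only [not_or, not_lt, not_le, not_and_or, not_not] at hg
    obtain ⟨hk, h0i, h0j, hil, hAj⟩ := hg
    have hA_ne : A ≠ [] := by
      intro hc
      rw [hc] at hil
      simp at hil
      omega
    have hjc : j < ((A.headD []).length : Int) := by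
      rcases hAj with h | h
      · exact absurd hA_ne (by simpa using h)
      · omega
    have hrect : ∀ r ∈ A, r.length = (A.headD []).length := by
      rcases hPre with ⟨_, _, h⟩ | h | ⟨h, _⟩ | ⟨_, h⟩
      · exact h
      · omega
      · omega
      · omega
    have hi : i.toNat < A.length := by omega
    have hdrop : A.drop i.toNat = A[i.toNat] :: A.drop (i.toNat + 1) :=
      List.drop_eq_getElem_cons hi
    have hlen : A[i.toNat].length = (A.headD []).length := hrect _ (List.getElem_mem hi)
    have hj : j.toNat < A[i.toNat].length := by omega
    have hfne : A[i.toNat].drop j.toNat ≠ [] := by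
      intro hc
      rw [List.drop_eq_nil_iff] at hc
      omega
    have hA : largest_sum_possible A i j k
        = G (A[i.toNat].drop j.toNat :: A.drop (i.toNat + 1)) k.toNat := by
      rw [A_bridge A hrect i j k h0i h0j]
      have hmatch : Aspec A i j k = if A[i.toNat].drop j.toNat = [] then 0
          else G (A[i.toNat].drop j.toNat :: A.drop (i.toNat + 1)) k.toNat := by
        unfold Aspec
        rw [hdrop]
      rw [hmatch, if_neg hfne]
    have hgetD : A.getD i.toNat [] = A[i.toNat] := by
      rw [List.getD_eq_getElem?_getD, List.getElem?_eq_getElem hi]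
      rfl
    have hB : largest_sum_possible_alt A i j k
        = G (A[i.toNat].drop j.toNat :: A.drop (i.toNat + 1)) k.toNat := by
      unfold largest_sum_possible_alt
      rw [if_neg (by intro hc; rcases hc with h | h | h | h | ⟨_, h⟩ <;> omega)]
      rw [hgetD]
      exact B_eval (A[i.toNat].drop j.toNat) (A.drop (i.toNat + 1)) k.toNat
    rw [hA, hB]
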